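-- pv_equiv track=rewrite | github.com/Kallendx82/SteganoFlaskver | imgstegno.py | create_shifted_substitution
-- ===== SOURCE A (Python) =====
-- def create_shifted_substitution(key):
--     """Membuat kamus substitusi yang digeser berdasarkan key."""
--     original_substitution = {
--         'A': 'Batu', 'B': 'Lebah', 'C': 'Kaca', 'D': 'Lada', 'E': 'Lelah', 'F': 'Info',
--         'G': 'Laga', 'H': 'Bahu', 'I': 'Diri', 'J': 'Baja', 'K': 'Luka', 'L': 'Pulau',
--         'M': 'Lama', 'N': 'Dunia', 'O': 'Solo', 'P': 'Tepi', 'Q': 'Taqwa', 'R': 'Bara',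
--         'S': 'Masa', 'T': 'Kota', 'U': 'Kutu', 'V': 'Lava', 'W': 'Mawar', 'X': 'Pixel',
--         'Y': 'Daya', 'Z': 'Azan',
--         'a': 'batu', 'b': 'lebah', 'c': 'kaca', 'd': 'lada', 'e': 'lelah', 'f': 'info',
--         'g': 'laga', 'h': 'bahu', 'i': 'diri', 'j': 'baja', 'k': 'luka', 'l': 'pulau',
--         'm': 'lama', 'n': 'dunia', 'o': 'solo', 'p': 'tepi', 'q': 'taqwa', 'r': 'bara',
--         's': 'masa', 't': 'kota', 'u': 'kutu', 'v': 'lava', 'w': 'mawar', 'x': 'pixel',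
--         'y': 'daya', 'z': 'azan',
--         ' ': 'spasi',
--         '.': 'titik',
--         ',': 'koma'
--     }
--
--     shifted_dict = {}
--     for k in original_substitution:
--         if k.isalpha():  # Hanya geser karakter alfabet
--             if k.isupper():
--                 new_pos = chr((ord(k) - ord('A') + key) % 26 + ord('A'))
--                 shifted_dict[k] = original_substitution[new_pos]
--             else:
--                 new_pos = chr((ord(k) - ord('a') + key) % 26 + ord('a'))
--                 shifted_dict[k] = original_substitution[new_pos]
--         else:
--             # Untuk karakter non-alfabet (spasi, titik, koma), gunakan substitusi langsung
--             shifted_dict[k] = original_substitution[k]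
--
--     return shifted_dict
-- ===== SOURCE B (Python) =====
-- UPPER_WORDS = ['Batu', 'Lebah', 'Kaca', 'Lada', 'Lelah', 'Info', 'Laga', 'Bahu',
--                'Diri', 'Baja', 'Luka', 'Pulau', 'Lama', 'Dunia', 'Solo', 'Tepi',
--                'Taqwa', 'Bara', 'Masa', 'Kota', 'Kutu', 'Lava', 'Mawar', 'Pixel',
--                'Daya', 'Azan']
--
--
-- def create_shifted_substitution(key):
--     """Same table, built by rotating the word list once and zipping with the alphabet."""
--     lower_words = [w.lower() for w in UPPER_WORDS]
--     s = key % 26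
--     rot_upper = UPPER_WORDS[s:] + UPPER_WORDS[:s]
--     rot_lower = lower_words[s:] + lower_words[:s]
--     pairs = (list(zip('ABCDEFGHIJKLMNOPQRSTUVWXYZ', rot_upper))
--              + list(zip('abcdefghijklmnopqrstuvwxyz', rot_lower))
--              + [(' ', 'spasi'), ('.', 'titik'), (',', 'koma')])
--     return dict(pairs)
-- ===== Notes on version B (the rewrite author's own statement) =====
-- stated objective: simpler
-- what changed: Instead of looping over every key of the dict and doing per-character ord/chr modular arithmetic with lookups back into the original dict, B rotates the fixed word list once by the reduced key and zips it with the two alphabets, appending the fixed punctuation pairs.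
import Mathlib
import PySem

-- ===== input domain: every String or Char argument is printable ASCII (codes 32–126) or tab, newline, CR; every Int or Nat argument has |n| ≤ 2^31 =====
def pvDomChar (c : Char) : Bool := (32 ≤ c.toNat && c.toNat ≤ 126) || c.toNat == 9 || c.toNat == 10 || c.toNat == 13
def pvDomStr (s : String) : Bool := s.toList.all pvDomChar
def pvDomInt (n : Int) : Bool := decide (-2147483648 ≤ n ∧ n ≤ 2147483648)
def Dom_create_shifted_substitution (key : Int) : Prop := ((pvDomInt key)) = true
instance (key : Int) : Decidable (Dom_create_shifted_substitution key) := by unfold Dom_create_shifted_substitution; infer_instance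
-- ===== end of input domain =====

-- B builds the same table by rotating the word list once by key % 26 and zipping with the alphabets (simpler decomposition).

-- ===== PORT A =====
-- the literal original_substitution dict of A
def pvOrigSub : PySem.Dict String String := PySem.Dict.mk
  [("A", "Batu"), ("B", "Lebah"), ("C", "Kaca"), ("D", "Lada"), ("E", "Lelah"), ("F", "Info"),
   ("G", "Laga"), ("H", "Bahu"), ("I", "Diri"), ("J", "Baja"), ("K", "Luka"), ("L", "Pulau"),
   ("M", "Lama"), ("N", "Dunia"), ("O", "Solo"), ("P", "Tepi"), ("Q", "Taqwa"), ("R", "Bara"),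
   ("S", "Masa"), ("T", "Kota"), ("U", "Kutu"), ("V", "Lava"), ("W", "Mawar"), ("X", "Pixel"),
   ("Y", "Daya"), ("Z", "Azan"),
   ("a", "batu"), ("b", "lebah"), ("c", "kaca"), ("d", "lada"), ("e", "lelah"), ("f", "info"),
   ("g", "laga"), ("h", "bahu"), ("i", "diri"), ("j", "baja"), ("k", "luka"), ("l", "pulau"),
   ("m", "lama"), ("n", "dunia"), ("o", "solo"), ("p", "tepi"), ("q", "taqwa"), ("r", "bara"),
   ("s", "masa"), ("t", "kota"), ("u", "kutu"), ("v", "lava"), ("w", "mawar"), ("x", "pixel"),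
   ("y", "daya"), ("z", "azan"),
   (" ", "spasi"),
   (".", "titik"),
   (",", "koma")]

-- ord(k) for the length-1 keys A iterates over (exact there); k.isupper() for a length-1
-- alphabetic string is isupper of its single character (exact there).
def pvOrdStr (s : String) : Int := ((s.toList.headD ' ').toNat : Int)
def pvIsUpperStr (s : String) : Bool := s.toList.all PySem.Chars.isupper

def create_shifted_substitution (key : Int) : List (String × String) :=
  (pvOrigSub.keys.foldl (fun (d : PySem.Dict String String) k =>
    if PySem.Str.strIsalpha k then
      if pvIsUpperStr k then
        d.insert k ((pvOrigSub.get? (String.ofList [Char.ofNat (PySem.Int.mod (pvOrdStr k - 65 + key) 26 + 65).toNat])).getD "")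
      else
        d.insert k ((pvOrigSub.get? (String.ofList [Char.ofNat (PySem.Int.mod (pvOrdStr k - 97 + key) 26 + 97).toNat])).getD "")
    else
      d.insert k ((pvOrigSub.get? k).getD "")) PySem.Dict.empty).items
  -- the two original_substitution[new_pos] lookups always succeed (new_pos is a letter of the same case)

-- ===== PORT B =====
def pvUpperWords : List String :=
  ["Batu", "Lebah", "Kaca", "Lada", "Lelah", "Info", "Laga", "Bahu",
   "Diri", "Baja", "Luka", "Pulau", "Lama", "Dunia", "Solo", "Tepi",
   "Taqwa", "Bara", "Masa", "Kota", "Kutu", "Lava", "Mawar", "Pixel",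
   "Daya", "Azan"]

def create_shifted_substitution_alt (key : Int) : List (String × String) :=
  let lowerWords := pvUpperWords.map PySem.Str.lower
  let s := PySem.Int.mod key 26
  let rotUpper := PySem.List.slice pvUpperWords (some s) none ++ PySem.List.slice pvUpperWords none (some s)
  let rotLower := PySem.List.slice lowerWords (some s) none ++ PySem.List.slice lowerWords none (some s)
  let pairs := ("ABCDEFGHIJKLMNOPQRSTUVWXYZ".toList.map (fun c => String.ofList [c])).zip rotUpper
            ++ ("abcdefghijklmnopqrstuvwxyz".toList.map (fun c => String.ofList [c])).zip rotLower
            ++ [(" ", "spasi"), (".", "titik"), (",", "koma")]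
  (PySem.Dict.ofList pairs).items

-- ===== PRECONDITION & SPEC =====
def Spec_create_shifted_substitution (key : Int) (out : List (String × String)) : Prop := out = create_shifted_substitution_alt key
instance (key : Int) (out : List (String × String)) : Decidable (Spec_create_shifted_substitution key out) := by unfold Spec_create_shifted_substitution; infer_instance

-- ===== CLAIM (what is proved, stated in full; the proofs are below) =====
def Claim_equal_create_shifted_substitution : Prop := ∀ (key : Int), Dom_create_shifted_substitution key → Spec_create_shifted_substitution key (create_shifted_substitution key)

-- ===== LEMMAS AND PROOFS =====

-- the value A stores for key k (the fold body is an insert of this value)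
def pvValA (key : Int) (k : String) : String :=
  if PySem.Str.strIsalpha k then
    if pvIsUpperStr k then
      (pvOrigSub.get? (String.ofList [Char.ofNat (PySem.Int.mod (pvOrdStr k - 65 + key) 26 + 65).toNat])).getD ""
    else
      (pvOrigSub.get? (String.ofList [Char.ofNat (PySem.Int.mod (pvOrdStr k - 97 + key) 26 + 97).toNat])).getD ""
  else (pvOrigSub.get? k).getD ""

def pvKU : List String := (List.range 26).map (fun j => String.ofList [Char.ofNat (j + 65)])
def pvKL : List String := (List.range 26).map (fun j => String.ofList [Char.ofNat (j + 97)])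
def pvLW : List String :=
  ["batu", "lebah", "kaca", "lada", "lelah", "info", "laga", "bahu",
   "diri", "baja", "luka", "pulau", "lama", "dunia", "solo", "tepi",
   "taqwa", "bara", "masa", "kota", "kutu", "lava", "mawar", "pixel",
   "daya", "azan"]

theorem pv_keys_split : pvOrigSub.keys = pvKU ++ pvKL ++ [" ", ".", ","] := by decide
theorem pv_lettersU : "ABCDEFGHIJKLMNOPQRSTUVWXYZ".toList.map (fun c => String.ofList [c]) = pvKU := by decide
theorem pv_lettersL : "abcdefghijklmnopqrstuvwxyz".toList.map (fun c => String.ofList [c]) = pvKL := by decide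
theorem pv_lower_words : pvUpperWords.map PySem.Str.lower = pvLW := by decide
theorem pv_keys_nodup : pvOrigSub.keys.Nodup := by decide
theorem pv_lenU : pvUpperWords.length = 26 := by decide
theorem pv_lenL : pvLW.length = 26 := by decide
theorem pv_lenKU : pvKU.length = 26 := by decide
theorem pv_lenKL : pvKL.length = 26 := by decide

theorem pv_LU : ∀ j : Nat, j < 26 →
    (pvOrigSub.get? (String.ofList [Char.ofNat (j + 65)])).getD "" = pvUpperWords.getD j "" := by decide
theorem pv_LL : ∀ j : Nat, j < 26 →
    (pvOrigSub.get? (String.ofList [Char.ofNat (j + 97)])).getD "" = pvLW.getD j "" := by decide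
theorem pv_alphaU : ∀ j : Nat, j < 26 →
    PySem.Str.strIsalpha (String.ofList [Char.ofNat (j + 65)]) = true := by decide
theorem pv_upperU : ∀ j : Nat, j < 26 →
    pvIsUpperStr (String.ofList [Char.ofNat (j + 65)]) = true := by decide
theorem pv_ordU : ∀ j : Nat, j < 26 →
    pvOrdStr (String.ofList [Char.ofNat (j + 65)]) = (j : Int) + 65 := by decide
theorem pv_alphaL : ∀ j : Nat, j < 26 →
    PySem.Str.strIsalpha (String.ofList [Char.ofNat (j + 97)]) = true := by decide
theorem pv_upperL : ∀ j : Nat, j < 26 →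
    pvIsUpperStr (String.ofList [Char.ofNat (j + 97)]) = false := by decide
theorem pv_ordL : ∀ j : Nat, j < 26 →
    pvOrdStr (String.ofList [Char.ofNat (j + 97)]) = (j : Int) + 97 := by decide


-- A's fold inserts distinct fresh keys, so its items are the mapped key list
theorem pv_A_items (key : Int) :
    create_shifted_substitution key = pvOrigSub.keys.map (fun k => (k, pvValA key k)) := by
  have hfun : (fun (d : PySem.Dict String String) k =>
      if PySem.Str.strIsalpha k then
        if pvIsUpperStr k then
          d.insert k ((pvOrigSub.get? (String.ofList [Char.ofNat (PySem.Int.mod (pvOrdStr k - 65 + key) 26 + 65).toNat])).getD "")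
        else
          d.insert k ((pvOrigSub.get? (String.ofList [Char.ofNat (PySem.Int.mod (pvOrdStr k - 97 + key) 26 + 97).toNat])).getD "")
      else
        d.insert k ((pvOrigSub.get? k).getD ""))
      = fun (d : PySem.Dict String String) k => d.insert k (pvValA key k) := by
    funext d k
    simp only [pvValA]
    split_ifs <;> rfl
  have h1 : ∀ k ∈ pvOrigSub.keys,
      (PySem.Dict.empty : PySem.Dict String String).contains k = false :=
    fun k _ => PySem.Dict.contains_empty k
  have h2 : (pvOrigSub.keys.map (fun s => s)).Nodup := by
    simpa using pv_keys_nodup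
  have h := PySem.Dict.items_foldl_insert_fresh pvOrigSub.keys (fun s => s) (pvValA key)
      (PySem.Dict.empty : PySem.Dict String String) h1 h2
  unfold create_shifted_substitution
  rw [hfun]
  simpa using h

theorem pv_ofList_items (ps : List (String × String)) (h : (ps.map Prod.fst).Nodup) :
    (PySem.Dict.ofList ps).items = ps := by
  have h1 : ∀ a ∈ ps, (PySem.Dict.empty : PySem.Dict String String).contains a.1 = false :=
    fun a _ => PySem.Dict.contains_empty _
  have h2 : (ps.map (fun p => p.1)).Nodup := h
  have h3 := PySem.Dict.items_foldl_insert_fresh ps (fun p => p.1) (fun p => p.2)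
      (PySem.Dict.empty : PySem.Dict String String) h1 h2
  show ((PySem.Dict.empty : PySem.Dict String String).update ps).items = ps
  unfold PySem.Dict.update
  simpa using h3

-- the main equivalence, for every integer key
theorem pv_main (key : Int) :
    create_shifted_substitution key = create_shifted_substitution_alt key := by
  have hmod : ∀ a : Int, PySem.Int.mod a 26 = a % 26 :=
    fun a => PySem.Int.mod_eq_emod_of_pos (by norm_num)
  have hs0 : (0 : Int) ≤ key % 26 := by omega
  have hn26 : (key % 26).toNat < 26 := by omega
  have hlenRU : (pvUpperWords.rotate ((key % 26).toNat)).length = 26 := by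
    rw [List.length_rotate, pv_lenU]
  have hlenRL : (pvLW.rotate ((key % 26).toNat)).length = 26 := by
    rw [List.length_rotate, pv_lenL]
  -- the three chunks
  have hU : pvKU.map (fun k => (k, pvValA key k))
      = pvKU.zip (pvUpperWords.rotate ((key % 26).toNat)) := by
    apply List.ext_getElem
    · simp [pv_lenKU, hlenRU]
    · intro i h1 h2
      have hi : i < 26 := by rw [List.length_map, pv_lenKU] at h1; exact h1
      simp only [List.getElem_map, List.getElem_zip, List.getElem_rotate, pv_lenU, pvKU,
        List.getElem_range, Prod.mk.injEq, true_and]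
      simp only [pvValA, pv_alphaU i hi, pv_upperU i hi, pv_ordU i hi, if_true, hmod]
      rw [show ((i : Int) + 65 - 65 + key) = (i : Int) + key from by ring]
      rw [show (((i : Int) + key) % 26 + 65).toNat = (i + (key % 26).toNat) % 26 + 65 from by omega]
      have hj : (i + (key % 26).toNat) % 26 < 26 := Nat.mod_lt _ (by norm_num)
      rw [pv_LU _ hj, List.getD_eq_getElem _ _ (by rw [pv_lenU]; exact hj)]
  have hL : pvKL.map (fun k => (k, pvValA key k))
      = pvKL.zip (pvLW.rotate ((key % 26).toNat)) := by
    apply List.ext_getElem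
    · simp [pv_lenKL, hlenRL]
    · intro i h1 h2
      have hi : i < 26 := by rw [List.length_map, pv_lenKL] at h1; exact h1
      simp only [List.getElem_map, List.getElem_zip, List.getElem_rotate, pv_lenL, pvKL,
        List.getElem_range, Prod.mk.injEq, true_and]
      simp only [pvValA, pv_alphaL i hi, pv_upperL i hi, pv_ordL i hi, if_true,
        Bool.false_eq_true, if_false, hmod]
      rw [show ((i : Int) + 97 - 97 + key) = (i : Int) + key from by ring]
      rw [show (((i : Int) + key) % 26 + 97).toNat = (i + (key % 26).toNat) % 26 + 97 from by omega]
      have hj : (i + (key % 26).toNat) % 26 < 26 := Nat.mod_lt _ (by norm_num)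
      rw [pv_LL _ hj, List.getD_eq_getElem _ _ (by rw [pv_lenL]; exact hj)]
  have hP : ([" ", ".", ","].map (fun k => (k, pvValA key k)) : List (String × String))
      = [(" ", "spasi"), (".", "titik"), (",", "koma")] := by rfl
  -- shape B
  simp only [create_shifted_substitution_alt, hmod]
  rw [pv_lower_words,
      PySem.List.slice_from pvUpperWords hs0, PySem.List.slice_to pvUpperWords hs0,
      PySem.List.slice_from pvLW hs0, PySem.List.slice_to pvLW hs0,
      ← List.rotate_eq_drop_append_take (by rw [pv_lenU]; omega),
      ← List.rotate_eq_drop_append_take (by rw [pv_lenL]; omega),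
      pv_lettersU, pv_lettersL]
  have hnodup : (((pvKU.zip (pvUpperWords.rotate ((key % 26).toNat))
      ++ pvKL.zip (pvLW.rotate ((key % 26).toNat))
      ++ [(" ", "spasi"), (".", "titik"), (",", "koma")]).map Prod.fst)).Nodup := by
    rw [List.map_append, List.map_append,
        List.map_fst_zip (by rw [pv_lenKU, hlenRU]),
        List.map_fst_zip (by rw [pv_lenKL, hlenRL])]
    have h := pv_keys_nodup
    rw [pv_keys_split] at h
    simpa using h
  rw [pv_ofList_items _ hnodup]
  -- shape A
  rw [pv_A_items, pv_keys_split, List.map_append, List.map_append, hU, hL, hP]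

-- ===== VERDICT (by name: the statement is the Claim_ definition above) =====
theorem create_shifted_substitution_spec : Claim_equal_create_shifted_substitution := by
  intro key _
  unfold Spec_create_shifted_substitution
  exact pv_main key
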